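-- pv_equiv track=rewrite | github.com/FAIZANTKHAN/DSA_Python | DSA20_Superior Elements In A Array.py | superiorElements
-- ===== SOURCE A (Python) =====
-- def superiorElements(arr: list[int]) -> list[int]:
--     n = len(arr)  # Get the length of the input list
--     i = n - 1  # Initialize a pointer to the last index
--     ans = []  # Initialize an empty list to store superior elements
--     mx = -float('inf')  # Initialize a variable to track the maximum value
--
--     while i >= 0:  # Iterate from the last index to the first
--         if arr[i] > mx:  # If the current element is greater than the maximum
--             ans.append(arr[i])  # Add it to the answer list
--             mx = arr[i]  # Update the maximum value
--         i -= 1  # Move the pointer to the left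
--
--     return ans  # Return the list of superior elements
-- ===== SOURCE B (Python) =====
-- def superiorElements(arr: list[int]) -> list[int]:
--     n = len(arr)
--     # Pass 1: exclusive suffix-maximum table; suf[i] = max(arr[i+1:]), None = -inf.
--     suf = [None] * n
--     best = None
--     for i in range(n - 1, -1, -1):
--         suf[i] = best
--         if best is None or arr[i] > best:
--             best = arr[i]
--     # Pass 2: filter right-to-left against the table.
--     return [arr[i] for i in range(n - 1, -1, -1) if suf[i] is None or arr[i] > suf[i]]
-- ===== Notes on version B (the rewrite author's own statement) =====
-- stated objective: alternative
-- what changed: B first builds an explicit exclusive suffix-maximum table in one pass, then filters the array right-to-left against that table, instead of A's single scan threading a running max through the output loop.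
import Mathlib
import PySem

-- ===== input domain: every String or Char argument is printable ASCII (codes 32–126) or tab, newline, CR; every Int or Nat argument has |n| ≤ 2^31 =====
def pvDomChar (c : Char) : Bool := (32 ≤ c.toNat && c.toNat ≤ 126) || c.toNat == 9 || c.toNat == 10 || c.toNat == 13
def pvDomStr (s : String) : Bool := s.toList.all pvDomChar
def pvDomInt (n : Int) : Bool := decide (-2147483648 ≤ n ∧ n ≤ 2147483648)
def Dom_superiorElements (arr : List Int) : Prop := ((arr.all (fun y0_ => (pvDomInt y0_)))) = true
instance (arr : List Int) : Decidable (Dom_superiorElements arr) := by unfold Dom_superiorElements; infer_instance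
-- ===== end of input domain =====

-- B replaces A's single right-to-left scan with a running max by an explicit exclusive
-- suffix-maximum table built in one pass plus a separate filtering pass (objective: alternative).

-- ===== PORT A =====
-- Python's mx starts at -float('inf'); modelled as Option Int with none = -inf.
-- 'x > mx' with mx possibly -inf:
def pvGtNegInf (x : Int) (mx : Option Int) : Bool :=
  match mx with
  | none => true
  | some m => decide (x > m)

-- while loop from i = n-1 down to 0 over (ans, mx); iterating arr from the right.
def superiorElements (arr : List Int) : List Int :=
  (arr.reverse.foldl
    (fun (st : List Int × Option Int) x =>
      if pvGtNegInf x st.2 then (st.1 ++ [x], some x) else st)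
    ([], none)).1

-- ===== PORT B =====
-- Pass 1 of Source B: builds the exclusive suffix-max table (paired with the element) and the
-- running best; returns (table for this suffix, max of this suffix).
def pvBuildSuf : List Int → List (Int × Option Int) × Option Int
  | [] => ([], none)
  | x :: xs =>
    let (t, best) := pvBuildSuf xs
    ((x, best) :: t,
     match best with
     | none => some x
     | some b => if x > b then some x else some b)

-- Pass 2 of Source B: filter right-to-left against the table.
def superiorElements_alt (arr : List Int) : List Int :=
  ((pvBuildSuf arr).1.reverse).filterMap
    (fun p => if pvGtNegInf p.1 p.2 then some p.1 else none)

-- ===== PRECONDITION & SPEC =====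
def Spec_superiorElements (arr : List Int) (out : List Int) : Prop := out = superiorElements_alt arr
instance (arr : List Int) (out : List Int) : Decidable (Spec_superiorElements arr out) := by unfold Spec_superiorElements; infer_instance

-- ===== CLAIM (what is proved, stated in full; the proofs are below) =====
def Claim_equal_superiorElements : Prop := ∀ (arr : List Int), Dom_superiorElements arr → Spec_superiorElements arr (superiorElements arr)

-- ===== LEMMAS AND PROOFS =====

-- max update step (used by both proof-side characterisations)
def pvMaxO (m : Option Int) (x : Int) : Option Int :=
  match m with
  | none => some x
  | some b => if x > b then some x else some b

-- annotate each element of l with the running max of the elements before it (seed m)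
def pvAnnot (m : Option Int) : List Int → List (Int × Option Int)
  | [] => []
  | x :: xs => (x, m) :: pvAnnot (pvMaxO m x) xs

theorem pvAnnot_append (m : Option Int) (l : List Int) (x : Int) :
    pvAnnot m (l ++ [x]) = pvAnnot m l ++ [(x, l.foldl pvMaxO m)] := by
  induction l generalizing m with
  | nil => simp [pvAnnot]
  | cons y ys ih => simp [pvAnnot, List.foldl, ih]

theorem pvBuildSuf_snd (arr : List Int) :
    (pvBuildSuf arr).2 = arr.reverse.foldl pvMaxO none := by
  induction arr with
  | nil => simp [pvBuildSuf]
  | cons x xs ih =>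
    simp only [pvBuildSuf, List.reverse_cons, List.foldl_append, List.foldl, ih]
    rcases h : (xs.reverse.foldl pvMaxO none) with _ | b <;> simp [pvMaxO]

theorem pvBuildSuf_reverse (arr : List Int) :
    (pvBuildSuf arr).1.reverse = pvAnnot none arr.reverse := by
  induction arr with
  | nil => simp [pvBuildSuf, pvAnnot]
  | cons x xs ih =>
    simp [pvBuildSuf, ih, pvAnnot_append, pvBuildSuf_snd]

-- A's loop over ys with accumulator (ans, mx) appends exactly the elements of ys that
-- beat the running max, i.e. the filter of the prefix-max annotation.
theorem pvLoop_char (ys : List Int) (ans : List Int) (mx : Option Int) :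
    (ys.foldl
      (fun (st : List Int × Option Int) x =>
        if pvGtNegInf x st.2 then (st.1 ++ [x], some x) else st)
      (ans, mx)).1
    = ans ++ (pvAnnot mx ys).filterMap
        (fun p => if pvGtNegInf p.1 p.2 then some p.1 else none) := by
  induction ys generalizing ans mx with
  | nil => simp [pvAnnot]
  | cons y ys ih =>
    simp only [List.foldl, pvAnnot, List.filterMap]
    by_cases h : pvGtNegInf y mx = true
    · have hmax : pvMaxO mx y = some y := by
        rcases mx with _ | b
        · rfl
        · simp [pvGtNegInf] at h
          simp [pvMaxO, h]
      simp [h, ih, hmax]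
    · have hmax : pvMaxO mx y = mx := by
        rcases mx with _ | b
        · simp [pvGtNegInf] at h
        · simp [pvGtNegInf] at h
          simp [pvMaxO]
          omega
      simp [h, ih, hmax]

-- ===== VERDICT (by name: the statement is the Claim_ definition above) =====
theorem superiorElements_spec : Claim_equal_superiorElements := by
  intro arr _
  show superiorElements arr = superiorElements_alt arr
  rw [superiorElements, superiorElements_alt, pvBuildSuf_reverse, pvLoop_char]
  simp
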